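-- pv_equiv track=rewrite | github.com/kimjune01/june.kim | worklog/temporal-spanner3.py | check_reachability_strict
-- ===== SOURCE A (Python) =====
-- from collections import defaultdict
--
-- def check_reachability_strict(n, timestamps):
--     """Check reachability with STRICTLY increasing timestamps."""
--     adj = defaultdict(list)
--     for (u, v), t in timestamps.items():
--         adj[u].append((v, t))
--         adj[v].append((u, t))
--
--     reachable = set()
--     for src in range(n):
--         best = {src: -1}  # -1 means we haven't used any edge yet
--         changed = True
--         while changed:
--             changed = False
--             for v in list(best.keys()):
--                 mt = best[v]
--                 for (w, t) in adj[v]: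
--                     if t > mt:  # STRICT
--                         if w not in best or t < best[w]:
--                             best[w] = t
--                             changed = True
--         for dst in best:
--             if dst != src:
--                 reachable.add((src, dst))
--     return reachable
-- ===== SOURCE B (Python) =====
-- def check_reachability_strict(n, timestamps):
--     """Check reachability with STRICTLY increasing timestamps.
--
--     One global sort of the edges by timestamp, then a single forward sweep
--     per source: an edge with timestamp t extends a journey iff one endpoint
--     was already reached strictly earlier than t, so processing edges in
--     nondecreasing timestamp order reaches a node iff some strictly
--     increasing path reaches it."""
--     edges = sorted(timestamps.items(), key=lambda kv: kv[1])
--     reachable = set()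
--     for src in range(n):
--         arrival = {src: -1}
--         for (u, v), t in edges:
--             if u in arrival and arrival[u] < t and v not in arrival:
--                 arrival[v] = t
--             if v in arrival and arrival[v] < t and u not in arrival:
--                 arrival[u] = t
--         for dst in arrival:
--             if dst != src:
--                 reachable.add((src, dst))
--     return reachable
-- ===== Notes on version B (the rewrite author's own statement) =====
-- stated objective: alternative
-- what changed: A runs, per source, a Bellman-Ford-style fixed-point iteration (repeated full passes over the known nodes until no relaxation fires); B sorts the edges once by timestamp and then, per source, does a single forward sweep over the sorted edge list, since an edge extends a strictly-increasing journey exactly when one endpoint was reached strictly earlier than its timestamp; it trades A's data-dependent repeated passes for one predictable pass per source.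
import Mathlib
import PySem

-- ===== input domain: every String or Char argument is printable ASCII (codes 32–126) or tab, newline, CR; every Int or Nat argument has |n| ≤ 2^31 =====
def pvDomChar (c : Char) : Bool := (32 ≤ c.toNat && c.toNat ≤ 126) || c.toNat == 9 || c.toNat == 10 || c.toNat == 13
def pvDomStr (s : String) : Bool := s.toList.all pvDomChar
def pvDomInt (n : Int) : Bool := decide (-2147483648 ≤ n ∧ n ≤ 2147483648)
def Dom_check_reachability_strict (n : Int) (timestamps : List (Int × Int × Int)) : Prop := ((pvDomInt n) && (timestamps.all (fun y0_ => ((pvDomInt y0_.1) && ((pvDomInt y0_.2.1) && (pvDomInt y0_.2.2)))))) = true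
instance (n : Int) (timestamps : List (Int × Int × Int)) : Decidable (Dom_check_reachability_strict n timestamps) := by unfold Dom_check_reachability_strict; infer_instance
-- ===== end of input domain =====

-- B replaces A's per-source Bellman-Ford-style fixed-point sweeps by one global sort of the
-- edges by timestamp followed by a single forward sweep per source.  Both functions return a
-- Python SET of pairs; set iteration order is not modelled, so both ports emit, for each src in
-- order, the reached destinations in sorted order — a canonical representation of the same set.

-- ===== PORT A =====

-- input decoding shared by both ports: 'timestamps' is a Python dict keyed by (u, v), so a
-- duplicate key overwrites in place; rebuild the dict and take its .items().
def pvItems (ts : List (Int × Int × Int)) : List (Int × Int × Int) :=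
  ((ts.foldl (fun (d : PySem.Dict (Int × Int) Int) e => d.insert (e.1, e.2.1) e.2.2)
      PySem.Dict.empty).items).map (fun p => (p.1.1, p.1.2, p.2))

-- adj = defaultdict(list); for (u, v), t in timestamps.items(): adj[u].append((v, t)); adj[v].append((u, t))
def pvAdj (es : List (Int × Int × Int)) : PySem.Dict Int (List (Int × Int)) :=
  es.foldl (fun d e =>
    (d.modify e.1 [] (fun l => l ++ [(e.2.1, e.2.2)])).modify e.2.1 [] (fun l => l ++ [(e.1, e.2.2)]))
    PySem.Dict.empty

-- innermost body: for (w, t) in adj[v]: if t > mt: if w not in best or t < best[w]: best[w] = t; changed = True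
def pvRelax (mt : Int) (st : PySem.Dict Int Int × Bool) (wt : Int × Int) : PySem.Dict Int Int × Bool :=
  if wt.2 > mt then
    (if st.1.contains wt.1 = false ∨ wt.2 < st.1.getD wt.1 0 then (st.1.insert wt.1 wt.2, true) else st)
  else st

-- one v of the pass: mt = best[v]  (v is a key — keys are never removed — so getD's default is never read)
def pvVisit (adj : PySem.Dict Int (List (Int × Int))) (st : PySem.Dict Int Int × Bool) (v : Int) : PySem.Dict Int Int × Bool :=
  (adj.getD v []).foldl (pvRelax (st.1.getD v 0)) st

-- one iteration of 'while changed': changed = False; for v in list(best.keys()): …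
def pvPass (adj : PySem.Dict Int (List (Int × Int))) (best : PySem.Dict Int Int) : PySem.Dict Int Int × Bool :=
  best.keys.foldl (pvVisit adj) (best, false)

-- the while loop, with fuel (pvFuel below is proved sufficient: the loop reaches its fixed point)
def pvLoopA (adj : PySem.Dict Int (List (Int × Int))) : Nat → PySem.Dict Int Int → PySem.Dict Int Int
  | 0, b => b
  | (f + 1), b =>
    let p := pvPass adj b
    if p.2 then pvLoopA adj f p.1 else p.1

def pvFuel (es : List (Int × Int × Int)) : Nat := (2 * es.length + 2) * (es.length + 2)

def check_reachability_strict (n : Int) (timestamps : List (Int × Int × Int)) : List (Int × Int) :=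
  let es := pvItems timestamps
  let adj := pvAdj es
  (PySem.List.pyRange 0 n).foldl (fun r src =>
      let best := pvLoopA adj (pvFuel es) (PySem.Dict.empty.insert src (-1))
      -- for dst in best: if dst != src: reachable.add((src, dst))  — emitted in canonical (sorted) order
      let dsts := PySem.List.sorted (best.keys.filter (fun d => decide (d ≠ src))) (fun x => x) false
      PySem.Set.update r (dsts.map (fun d => (src, d))))
    PySem.Set.empty

-- ===== PORT B =====

-- one edge of the sweep: each of the two 'if' statements of Source B is one pvStep
def pvStep (arr : PySem.Dict Int Int) (x y t : Int) : PySem.Dict Int Int :=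
  if arr.contains x = true ∧ arr.getD x 0 < t ∧ arr.contains y = false then arr.insert y t else arr

def pvSweep (arr : PySem.Dict Int Int) (e : Int × Int × Int) : PySem.Dict Int Int :=
  pvStep (pvStep arr e.1 e.2.1 e.2.2) e.2.1 e.1 e.2.2

def check_reachability_strict_alt (n : Int) (timestamps : List (Int × Int × Int)) : List (Int × Int) :=
  let es := pvItems timestamps
  let edges := PySem.List.sorted es (fun e => e.2.2) false
  (PySem.List.pyRange 0 n).foldl (fun r src =>
      let arrival := edges.foldl pvSweep (PySem.Dict.empty.insert src (-1))
      -- for dst in arrival: if dst != src: reachable.add((src, dst))  — emitted in canonical (sorted) order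
      let dsts := PySem.List.sorted (arrival.keys.filter (fun d => decide (d ≠ src))) (fun x => x) false
      PySem.Set.update r (dsts.map (fun d => (src, d))))
    PySem.Set.empty

-- ===== PRECONDITION & SPEC =====
def Spec_check_reachability_strict (n : Int) (timestamps : List (Int × Int × Int)) (out : List (Int × Int)) : Prop := out = check_reachability_strict_alt n timestamps
instance (n : Int) (timestamps : List (Int × Int × Int)) (out : List (Int × Int)) : Decidable (Spec_check_reachability_strict n timestamps out) := by unfold Spec_check_reachability_strict; infer_instance

-- ===== CLAIM (what is proved, stated in full; the proofs are below) =====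
def Claim_equal_check_reachability_strict : Prop := ∀ (n : Int) (timestamps : List (Int × Int × Int)), Dom_check_reachability_strict n timestamps → Spec_check_reachability_strict n timestamps (check_reachability_strict n timestamps)

-- ===== LEMMAS AND PROOFS =====

-- strictly-increasing-timestamp reachability: pvReach es src w a means some journey from src
-- reaches w whose last edge has timestamp a (a = -1 for the empty journey at src)
inductive pvReach (es : List (Int × Int × Int)) (src : Int) : Int → Int → Prop
  | base : pvReach es src src (-1)
  | step {v a w t : Int} : pvReach es src v a → ((v, w, t) ∈ es ∨ (w, v, t) ∈ es) → a < t →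
      pvReach es src w t

-- the abstract interface both algorithms establish for their final per-source dict
def pvGood (es : List (Int × Int × Int)) (src : Int) (b : PySem.Dict Int Int) : Prop :=
  b.contains src = true ∧ b.getD src 0 = -1 ∧
  ∀ k, b.contains k = true → -1 ≤ b.getD k 0 ∧ pvReach es src k (b.getD k 0)

def pvClosed (es : List (Int × Int × Int)) (b : PySem.Dict Int Int) : Prop :=
  ∀ v w t, b.contains v = true → ((v, w, t) ∈ es ∨ (w, v, t) ∈ es) → b.getD v 0 < t →
    b.contains w = true ∧ b.getD w 0 ≤ t

theorem pvReach_mem {es : List (Int × Int × Int)} {src : Int} {b : PySem.Dict Int Int}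
    (hg : pvGood es src b) (hc : pvClosed es b) :
    ∀ {w a : Int}, pvReach es src w a → b.contains w = true ∧ b.getD w 0 ≤ a := by
  intro w a h
  induction h with
  | base => exact ⟨hg.1, le_of_eq hg.2.1⟩
  | step hr he hlt ih => exact hc _ _ _ ih.1 he (lt_of_le_of_lt ih.2 hlt)

theorem pvContains_iff {es : List (Int × Int × Int)} {src : Int} {b b' : PySem.Dict Int Int}
    (hg : pvGood es src b) (hc : pvClosed es b) (hg' : pvGood es src b') (hc' : pvClosed es b') :
    ∀ k, b.contains k = b'.contains k := by
  intro k
  by_cases h : b.contains k = true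
  · rw [h, (pvReach_mem hg' hc' (hg.2.2 k h).2).1]
  · by_cases h' : b'.contains k = true
    · exact absurd (pvReach_mem hg hc (hg'.2.2 k h').2).1 h
    · rw [Bool.not_eq_true] at h h'; rw [h, h']

-- ---- initial per-source dict ----

theorem pvInit_nodup (src : Int) : ((PySem.Dict.empty : PySem.Dict Int Int).insert src (-1)).keys.Nodup :=
  PySem.Dict.nodup_keys_insert _ _ _ PySem.Dict.nodup_keys_empty

theorem pvInit_contains (src k : Int) :
    ((PySem.Dict.empty : PySem.Dict Int Int).insert src (-1)).contains k = true ↔ k = src := by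
  rw [PySem.Dict.contains_insert, PySem.Dict.contains_empty]
  simp

theorem pvInit_good (es : List (Int × Int × Int)) (src : Int) :
    pvGood es src ((PySem.Dict.empty : PySem.Dict Int Int).insert src (-1)) := by
  refine ⟨(pvInit_contains src src).2 rfl, PySem.Dict.getD_insert_self _ _ _ _, ?_⟩
  intro k hk
  have hks := (pvInit_contains src k).1 hk
  subst hks
  rw [PySem.Dict.getD_insert_self]
  exact ⟨le_refl _, pvReach.base⟩

-- ---- single insert helpers ----

theorem pvIns_pers (b : PySem.Dict Int Int) (w t k : Int) (hw : b.contains w = false)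
    (hk : b.contains k = true) :
    (b.insert w t).contains k = true ∧ (b.insert w t).getD k 0 = b.getD k 0 := by
  have hne : k ≠ w := by rintro rfl; rw [hk] at hw; cases hw
  constructor
  · rw [PySem.Dict.contains_insert, hk, Bool.or_true]
  · rw [PySem.Dict.getD_insert]; simp [hne]

theorem pvIns_good {es : List (Int × Int × Int)} {src : Int} {b : PySem.Dict Int Int}
    (hg : pvGood es src b) {x y t : Int} (hx : b.contains x = true) (hlt : b.getD x 0 < t)
    (hy : b.contains y = false) (he : (x, y, t) ∈ es ∨ (y, x, t) ∈ es) :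
    pvGood es src (b.insert y t) := by
  obtain ⟨hs, hsv, hall⟩ := hg
  refine ⟨(pvIns_pers b y t src hy hs).1, by rw [(pvIns_pers b y t src hy hs).2]; exact hsv, ?_⟩
  intro k hk
  by_cases hky : k = y
  · subst hky
    rw [PySem.Dict.getD_insert_self]
    have h1 := hall x hx
    exact ⟨le_of_lt (lt_of_le_of_lt h1.1 hlt), pvReach.step h1.2 he hlt⟩
  · have hkb : b.contains k = true := by
      have := PySem.Dict.contains_insert b y k t
      rw [hk] at this
      cases hcb : b.contains k
      · rw [hcb, Bool.or_false] at this
        exact absurd (by simpa using this.symm) hky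
      · rfl
    rw [PySem.Dict.getD_insert]; simp only [hky, if_false]
    exact hall k hkb

theorem pvIns_new (b : PySem.Dict Int Int) (w t k : Int) (hk : (b.insert w t).contains k = true) :
    b.contains k = true ∨ (b.contains k = false ∧ k = w ∧ (b.insert w t).getD k 0 = t) := by
  cases hcb : b.contains k
  · right
    have hkw : k = w := by
      have := PySem.Dict.contains_insert b w k t
      rw [hk, hcb, Bool.or_false] at this
      simpa using this.symm
    subst hkw
    exact ⟨rfl, rfl, PySem.Dict.getD_insert_self _ _ _ _⟩
  · exact Or.inl rfl

-- ---- facts about one conditional insert (one 'if' of Source B) ----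

theorem pvStep_nodup (arr : PySem.Dict Int Int) (x y t : Int) (h : arr.keys.Nodup) :
    (pvStep arr x y t).keys.Nodup := by
  unfold pvStep
  split_ifs
  · exact PySem.Dict.nodup_keys_insert _ _ _ h
  · exact h

theorem pvStep_pers (arr : PySem.Dict Int Int) (x y t k : Int) (hk : arr.contains k = true) :
    (pvStep arr x y t).contains k = true ∧ (pvStep arr x y t).getD k 0 = arr.getD k 0 := by
  unfold pvStep
  split_ifs with h
  · exact pvIns_pers arr y t k h.2.2 hk
  · exact ⟨hk, rfl⟩

theorem pvStep_new (arr : PySem.Dict Int Int) (x y t k : Int)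
    (hk : (pvStep arr x y t).contains k = true) :
    arr.contains k = true ∨
      (arr.contains k = false ∧ k = y ∧ (pvStep arr x y t).getD k 0 = t) := by
  revert hk
  unfold pvStep
  split_ifs with h <;> intro hk
  · exact pvIns_new arr y t k hk
  · exact Or.inl hk

theorem pvStep_good {es : List (Int × Int × Int)} {src : Int} {arr : PySem.Dict Int Int}
    {x y t : Int} (he : (x, y, t) ∈ es ∨ (y, x, t) ∈ es) (hg : pvGood es src arr) :
    pvGood es src (pvStep arr x y t) := by
  unfold pvStep
  split_ifs with h
  · exact pvIns_good hg h.1 h.2.1 h.2.2 he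
  · exact hg

theorem pvStep_fire (arr : PySem.Dict Int Int) (x y t : Int) (hx : arr.contains x = true)
    (hlt : arr.getD x 0 < t) (hyb : arr.contains y = true → arr.getD y 0 ≤ t) :
    (pvStep arr x y t).contains y = true ∧ (pvStep arr x y t).getD y 0 ≤ t := by
  unfold pvStep
  split_ifs with h
  · rw [PySem.Dict.getD_insert_self, PySem.Dict.contains_insert]
    simp
  · have hcy : arr.contains y = true := by
      cases hc : arr.contains y
      · exact absurd ⟨hx, hlt, hc⟩ h
      · rfl
    exact ⟨hcy, hyb hcy⟩

-- ---- the corresponding facts about one edge of the sweep ----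

theorem pvSweep_nodup (arr : PySem.Dict Int Int) (e : Int × Int × Int) (h : arr.keys.Nodup) :
    (pvSweep arr e).keys.Nodup :=
  pvStep_nodup _ _ _ _ (pvStep_nodup _ _ _ _ h)

theorem pvSweep_pers (arr : PySem.Dict Int Int) (e : Int × Int × Int) (k : Int)
    (hk : arr.contains k = true) :
    (pvSweep arr e).contains k = true ∧ (pvSweep arr e).getD k 0 = arr.getD k 0 := by
  have p1 := pvStep_pers arr e.1 e.2.1 e.2.2 k hk
  have p2 := pvStep_pers _ e.2.1 e.1 e.2.2 k p1.1
  exact ⟨p2.1, p2.2.trans p1.2⟩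

theorem pvSweep_new (arr : PySem.Dict Int Int) (e : Int × Int × Int) (k : Int)
    (hk : (pvSweep arr e).contains k = true) :
    arr.contains k = true ∨ (arr.contains k = false ∧ (pvSweep arr e).getD k 0 = e.2.2) := by
  unfold pvSweep at hk ⊢
  rcases pvStep_new _ e.2.1 e.1 e.2.2 k hk with h1 | ⟨hc1, _, hv1⟩
  · rcases pvStep_new arr e.1 e.2.1 e.2.2 k h1 with h0 | ⟨hc0, _, hv0⟩
    · exact Or.inl h0
    · right
      refine ⟨hc0, ?_⟩
      rw [(pvStep_pers _ e.2.1 e.1 e.2.2 k h1).2, hv0]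
  · right
    refine ⟨?_, hv1⟩
    cases hc : arr.contains k
    · rfl
    · exact absurd (pvStep_pers arr e.1 e.2.1 e.2.2 k hc).1 (by rw [hc1]; simp)

theorem pvSweep_good {es : List (Int × Int × Int)} {src : Int} {arr : PySem.Dict Int Int}
    (e : Int × Int × Int) (hes : e ∈ es) (hg : pvGood es src arr) :
    pvGood es src (pvSweep arr e) := by
  have he : ((e.1, e.2.1, e.2.2) : Int × Int × Int) ∈ es := by simpa using hes
  exact pvStep_good (Or.inr he) (pvStep_good (Or.inl he) hg)

theorem pvSweep_closed {es : List (Int × Int × Int)} {src : Int} {arr : PySem.Dict Int Int}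
    (e : Int × Int × Int) (hg : pvGood es src arr)
    (hcompat : ∀ k, arr.contains k = true → arr.getD k 0 = -1 ∨ arr.getD k 0 ≤ e.2.2) :
    ((pvSweep arr e).contains e.1 = true → (pvSweep arr e).getD e.1 0 < e.2.2 →
      (pvSweep arr e).contains e.2.1 = true ∧ (pvSweep arr e).getD e.2.1 0 ≤ e.2.2) ∧
    ((pvSweep arr e).contains e.2.1 = true → (pvSweep arr e).getD e.2.1 0 < e.2.2 →
      (pvSweep arr e).contains e.1 = true ∧ (pvSweep arr e).getD e.1 0 ≤ e.2.2) := by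
  unfold pvSweep
  set u := e.1 with hu
  set v := e.2.1 with hv
  set t := e.2.2 with ht
  set s1 := pvStep arr u v t with hs1
  have hbound : ∀ k, arr.contains k = true → arr.getD k 0 < t → arr.getD k 0 ≥ -1 :=
    fun k hk _ => (hg.2.2 k hk).1
  constructor
  · -- u reached with value < t ⇒ v reached with value ≤ t
    intro hcu hult
    rcases pvStep_new s1 v u t u hcu with h1 | ⟨_, _, hvval⟩
    · rcases pvStep_new arr u v t u h1 with h0 | ⟨_, huv, hval⟩
      · -- u already in arr, value preserved
        have pu1 := pvStep_pers arr u v t u h0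
        have pu2 := pvStep_pers s1 v u t u h1
        have hult' : arr.getD u 0 < t := by
          rw [pu2.2, pu1.2] at hult
          exact hult
        have hyb : arr.contains v = true → arr.getD v 0 ≤ t := by
          intro hcv
          rcases hcompat v hcv with hm | hle
          · rw [hm]
            have := hbound u h0 hult'
            omega
          · exact hle
        have f1 := pvStep_fire arr u v t h0 hult' hyb
        have pv2 := pvStep_pers s1 v u t v f1.1
        exact ⟨pv2.1, by rw [pv2.2]; exact f1.2⟩
      · -- u was inserted by the first step (u = v), its value is t: contradicts < t
        exfalso
        have pu2 := pvStep_pers s1 v u t u h1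
        rw [pu2.2, hval] at hult
        exact absurd hult (lt_irrefl _)
    · -- u was inserted by the second step, its value is t: contradicts < t
      exfalso
      rw [hvval] at hult
      exact absurd hult (lt_irrefl _)
  · -- v reached with value < t ⇒ u reached with value ≤ t
    intro hcv hvlt
    rcases pvStep_new s1 v u t v hcv with h1 | ⟨_, hveq, hval⟩
    · rcases pvStep_new arr u v t v h1 with h0 | ⟨_, _, hval0⟩
      · -- v already in arr, value preserved
        have pv1 := pvStep_pers arr u v t v h0
        have pv2 := pvStep_pers s1 v u t v h1
        have hvlt' : s1.getD v 0 < t := by rw [pv2.2] at hvlt; exact hvlt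
        have hyb : s1.contains u = true → s1.getD u 0 ≤ t := by
          intro hcu
          rcases pvStep_new arr u v t u hcu with hu0 | ⟨_, _, huv⟩
          · rw [(pvStep_pers arr u v t u hu0).2]
            rcases hcompat u hu0 with hm | hle
            · rw [hm]
              rw [pv1.2] at hvlt'
              have := hbound v h0 hvlt'
              omega
            · exact hle
          · rw [huv]
        exact pvStep_fire s1 v u t h1 hvlt' hyb
      · -- v inserted by first step with value t: contradicts < t
        exfalso
        have pv2 := pvStep_pers s1 v u t v h1
        rw [pv2.2, hval0] at hvlt
        exact absurd hvlt (lt_irrefl _)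
    · -- v inserted by second step: then v = u with value t: contradicts < t
      exfalso
      rw [hval] at hvlt
      exact absurd hvlt (lt_irrefl _)

-- ---- B's whole sweep ----

theorem pvSweepFold (es : List (Int × Int × Int)) (src : Int) :
    ∀ (l : List (Int × Int × Int)) (arr : PySem.Dict Int Int),
      l.Pairwise (fun a b => a.2.2 ≤ b.2.2) → (∀ e ∈ l, e ∈ es) →
      arr.keys.Nodup → pvGood es src arr →
      (∀ k, arr.contains k = true → arr.getD k 0 = -1 ∨ ∀ e ∈ l, arr.getD k 0 ≤ e.2.2) →
      (l.foldl pvSweep arr).keys.Nodup ∧ pvGood es src (l.foldl pvSweep arr) ∧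
      (∀ k, arr.contains k = true →
        (l.foldl pvSweep arr).contains k = true ∧ (l.foldl pvSweep arr).getD k 0 = arr.getD k 0) ∧
      (∀ k, (l.foldl pvSweep arr).contains k = true →
        arr.contains k = true ∨ ∃ e ∈ l, (l.foldl pvSweep arr).getD k 0 = e.2.2) ∧
      (∀ e ∈ l,
        ((l.foldl pvSweep arr).contains e.1 = true → (l.foldl pvSweep arr).getD e.1 0 < e.2.2 →
          (l.foldl pvSweep arr).contains e.2.1 = true ∧ (l.foldl pvSweep arr).getD e.2.1 0 ≤ e.2.2) ∧
        ((l.foldl pvSweep arr).contains e.2.1 = true → (l.foldl pvSweep arr).getD e.2.1 0 < e.2.2 →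
          (l.foldl pvSweep arr).contains e.1 = true ∧ (l.foldl pvSweep arr).getD e.1 0 ≤ e.2.2)) := by
  intro l
  induction l with
  | nil =>
    intro arr _ _ hnd hg _
    refine ⟨hnd, hg, fun k hk => ⟨hk, rfl⟩, fun k hk => Or.inl hk, by simp⟩
  | cons e0 l' ih =>
    intro arr hpw hes hnd hg hcompat
    have hpw' := (List.pairwise_cons.mp hpw)
    have harr1nd := pvSweep_nodup arr e0 hnd
    have harr1g := pvSweep_good e0 (hes e0 (List.mem_cons_self)) hg
    have hcompat0 : ∀ k, arr.contains k = true → arr.getD k 0 = -1 ∨ arr.getD k 0 ≤ e0.2.2 := by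
      intro k hk
      rcases hcompat k hk with hm | hle
      · exact Or.inl hm
      · exact Or.inr (hle e0 (List.mem_cons_self))
    have hcompat1 : ∀ k, (pvSweep arr e0).contains k = true →
        (pvSweep arr e0).getD k 0 = -1 ∨ ∀ e ∈ l', (pvSweep arr e0).getD k 0 ≤ e.2.2 := by
      intro k hk
      rcases pvSweep_new arr e0 k hk with hold | ⟨_, hv⟩
      · rw [(pvSweep_pers arr e0 k hold).2]
        rcases hcompat k hold with hm | hle
        · exact Or.inl hm
        · exact Or.inr (fun e he => hle e (List.mem_cons_of_mem _ he))
      · rw [hv]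
        exact Or.inr (fun e he => hpw'.1 e he)
    have IH := ih (pvSweep arr e0) hpw'.2 (fun e he => hes e (List.mem_cons_of_mem _ he))
      harr1nd harr1g hcompat1
    obtain ⟨ind, ig, ipers, inew, iclos⟩ := IH
    have hfold : (e0 :: l').foldl pvSweep arr = l'.foldl pvSweep (pvSweep arr e0) := rfl
    rw [hfold]
    refine ⟨ind, ig, ?_, ?_, ?_⟩
    · intro k hk
      have p0 := pvSweep_pers arr e0 k hk
      have p1 := ipers k p0.1
      exact ⟨p1.1, p1.2.trans p0.2⟩
    · intro k hk
      rcases inew k hk with h1 | ⟨e, he, hv⟩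
      · rcases pvSweep_new arr e0 k h1 with hold | ⟨hc, hv0⟩
        · exact Or.inl hold
        · right
          exact ⟨e0, List.mem_cons_self, by rw [(ipers k h1).2, hv0]⟩
      · exact Or.inr ⟨e, List.mem_cons_of_mem _ he, hv⟩
    · intro e he
      rcases List.mem_cons.mp he with rfl | he'
      · -- closure for the head edge
        have sclos := pvSweep_closed e hg hcompat0
        constructor
        · intro hcu hult
          rcases inew e.1 hcu with h1 | ⟨e', he', hv⟩
          · have pu := ipers e.1 h1
            rw [pu.2] at hult
            have := sclos.1 h1 hult
            have pv := ipers e.2.1 this.1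
            exact ⟨pv.1, by rw [pv.2]; exact this.2⟩
          · exfalso
            rw [hv] at hult
            exact absurd (hpw'.1 e' he') (not_le.mpr hult)
        · intro hcv hvlt
          rcases inew e.2.1 hcv with h1 | ⟨e', he', hv⟩
          · have pv := ipers e.2.1 h1
            rw [pv.2] at hvlt
            have := sclos.2 h1 hvlt
            have pu := ipers e.1 this.1
            exact ⟨pu.1, by rw [pu.2]; exact this.2⟩
          · exfalso
            rw [hv] at hvlt
            exact absurd (hpw'.1 e' he') (not_le.mpr hvlt)
      · exact iclos e he'

theorem pvB_final (es : List (Int × Int × Int)) (src : Int) :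
    ((PySem.List.sorted es (fun e => e.2.2) false).foldl pvSweep
        ((PySem.Dict.empty : PySem.Dict Int Int).insert src (-1))).keys.Nodup ∧
    pvGood es src ((PySem.List.sorted es (fun e => e.2.2) false).foldl pvSweep
        ((PySem.Dict.empty : PySem.Dict Int Int).insert src (-1))) ∧
    pvClosed es ((PySem.List.sorted es (fun e => e.2.2) false).foldl pvSweep
        ((PySem.Dict.empty : PySem.Dict Int Int).insert src (-1))) := by
  have main := pvSweepFold es src (PySem.List.sorted es (fun e => e.2.2) false)
    ((PySem.Dict.empty : PySem.Dict Int Int).insert src (-1))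
    (PySem.List.sorted_pairwise es (fun e => e.2.2))
    (fun e he => (PySem.List.mem_sorted es (fun e => e.2.2) false e).mp he)
    (pvInit_nodup src) (pvInit_good es src)
    (by
      intro k hk
      have := (pvInit_contains src k).1 hk
      subst this
      left
      exact PySem.Dict.getD_insert_self _ _ _ _)
  obtain ⟨hnd, hg, _, _, hclos⟩ := main
  refine ⟨hnd, hg, ?_⟩
  intro v w t hv he hlt
  rcases he with h | h
  · have hm : ((v, w, t) : Int × Int × Int) ∈ PySem.List.sorted es (fun e => e.2.2) false :=
      (PySem.List.mem_sorted es (fun e => e.2.2) false _).mpr h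
    exact (hclos (v, w, t) hm).1 hv hlt
  · have hm : ((w, v, t) : Int × Int × Int) ∈ PySem.List.sorted es (fun e => e.2.2) false :=
      (PySem.List.mem_sorted es (fun e => e.2.2) false _).mpr h
    exact (hclos (w, v, t) hm).2 hv hlt

-- ---- A: the adjacency dict ----

def pvPairs (es : List (Int × Int × Int)) : List (Int × Int × Int) :=
  es.flatMap (fun e => [(e.1, e.2.1, e.2.2), (e.2.1, e.1, e.2.2)])

theorem pvAdj_eq (es : List (Int × Int × Int)) :
    pvAdj es = (pvPairs es).foldl (fun d p => d.modify p.1 [] (fun l => l ++ [p.2]))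
      PySem.Dict.empty := by
  unfold pvAdj pvPairs
  rw [List.foldl_flatMap]
  rfl

theorem pvMem_pairs (es : List (Int × Int × Int)) (x y s : Int) :
    ((x, y, s) : Int × Int × Int) ∈ pvPairs es ↔ ((x, y, s) ∈ es ∨ (y, x, s) ∈ es) := by
  unfold pvPairs
  rw [List.mem_flatMap]
  constructor
  · rintro ⟨e, he, h⟩
    obtain ⟨a, b, c⟩ := e
    simp only [List.mem_cons, List.not_mem_nil, or_false] at h
    rcases h with h | h <;> simp only [Prod.mk.injEq] at h <;>
      obtain ⟨rfl, rfl, rfl⟩ := h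
    · exact Or.inl he
    · exact Or.inr he
  · rintro (h | h)
    · exact ⟨(x, y, s), h, by simp⟩
    · exact ⟨(y, x, s), h, by simp⟩

theorem pvMem_adj (es : List (Int × Int × Int)) (v w t : Int) :
    ((w, t) ∈ (pvAdj es).getD v []) ↔ ((v, w, t) ∈ es ∨ (w, v, t) ∈ es) := by
  rw [pvAdj_eq, PySem.Dict.getD_foldl_modify_append, PySem.Dict.getD_empty, List.nil_append]
  rw [← pvMem_pairs es v w t]
  simp only [List.mem_map, List.mem_filter]
  constructor
  · rintro ⟨p, ⟨hp, hpv⟩, hp2⟩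
    have : p = (v, w, t) := by
      obtain ⟨a, bc⟩ := p
      simp only at hpv hp2
      simp only [beq_iff_eq] at hpv
      rw [hpv, hp2]
    rwa [this] at hp
  · intro h
    exact ⟨(v, w, t), ⟨h, by simp⟩, rfl⟩

-- ---- A: key universe, value universe, the termination measure ----

def pvKU (es : List (Int × Int × Int)) (src : Int) : List Int :=
  PySem.Set.ofList (src :: es.flatMap (fun e => [e.1, e.2.1]))

def pvVals (es : List (Int × Int × Int)) : List Int := -1 :: es.map (fun e => e.2.2)

def pvRank (es : List (Int × Int × Int)) (x : Int) : Nat :=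
  (pvVals es).countP (fun y => decide (y < x))

def pvG (es : List (Int × Int × Int)) (b : PySem.Dict Int Int) (k : Int) : Nat :=
  if b.contains k = true then pvRank es (b.getD k 0) else (pvVals es).length

def pvMu (es : List (Int × Int × Int)) (src : Int) (b : PySem.Dict Int Int) : Nat :=
  ((pvKU es src).map (pvG es b)).sum

-- the full invariant A's loop maintains
def pvInvA (es : List (Int × Int × Int)) (src : Int) (b : PySem.Dict Int Int) : Prop :=
  pvGood es src b ∧ b.keys.Nodup ∧
  ∀ k, b.contains k = true → k ∈ pvKU es src ∧ b.getD k 0 ∈ pvVals es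

theorem pvKU_mem {es : List (Int × Int × Int)} (src : Int) {x y s : Int}
    (h : (x, y, s) ∈ es ∨ (y, x, s) ∈ es) : y ∈ pvKU es src := by
  unfold pvKU
  rw [PySem.Set.mem_ofList, List.mem_cons]
  right
  rw [List.mem_flatMap]
  rcases h with h | h
  · exact ⟨(x, y, s), h, by simp⟩
  · exact ⟨(y, x, s), h, by simp⟩

theorem pvVals_mem {es : List (Int × Int × Int)} {x y s : Int}
    (h : (x, y, s) ∈ es ∨ (y, x, s) ∈ es) : s ∈ pvVals es := by
  unfold pvVals
  rw [List.mem_cons]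
  right
  rw [List.mem_map]
  rcases h with h | h
  · exact ⟨(x, y, s), h, rfl⟩
  · exact ⟨(y, x, s), h, rfl⟩

theorem pvCountP_lt_countP {α : Type} (l : List α) (p q : α → Bool)
    (himp : ∀ a, p a = true → q a = true) (x : α) (hx : x ∈ l) (hq : q x = true)
    (hp : p x = false) : l.countP p < l.countP q := by
  induction l with
  | nil => cases hx
  | cons a l ih =>
    rw [List.countP_cons, List.countP_cons]
    rcases List.mem_cons.mp hx with rfl | hx'
    · have hle := List.countP_mono_left (l := l) (fun a _ h => himp a h)
      rw [hp, hq]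
      have e1 : (if false = true then (1 : Nat) else 0) = 0 := rfl
      have e2 : (if true = true then (1 : Nat) else 0) = 1 := rfl
      rw [e1, e2]
      omega
    · have hlt := ih hx'
      have : (if p a then 1 else 0) ≤ (if q a then 1 else 0) := by
        cases hpa : p a
        · simp
        · rw [himp a hpa]
      omega

theorem pvRank_lt_len (es : List (Int × Int × Int)) (x : Int) (hx : x ∈ pvVals es) :
    pvRank es x < (pvVals es).length := by
  rcases lt_or_eq_of_le (List.countP_le_length (p := fun y => decide (y < x)) (l := pvVals es))
    with h | h
  · exact h
  · exfalso
    have := (List.countP_eq_length.mp h) x hx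
    simp at this
  
theorem pvRank_lt (es : List (Int × Int × Int)) (x y : Int) (hx : x ∈ pvVals es) (hlt : x < y) :
    pvRank es x < pvRank es y := by
  apply pvCountP_lt_countP _ _ _ _ x hx
  · simp [hlt]
  · simp
  · intro a ha
    simp only [decide_eq_true_eq] at ha ⊢
    omega

theorem pvG_le_len (es : List (Int × Int × Int)) (b : PySem.Dict Int Int) (k : Int) :
    pvG es b k ≤ (pvVals es).length := by
  unfold pvG
  split_ifs
  · exact List.countP_le_length
  · exact le_refl _

theorem pvG_insert_ne (es : List (Int × Int × Int)) (b : PySem.Dict Int Int) (w t k : Int)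
    (hk : k ≠ w) : pvG es (b.insert w t) k = pvG es b k := by
  unfold pvG
  rw [PySem.Dict.contains_insert, PySem.Dict.getD_insert]
  simp [hk]

theorem pvMu_insert_lt {es : List (Int × Int × Int)} {src : Int} {b : PySem.Dict Int Int}
    {w t : Int} (hw : w ∈ pvKU es src) (ht : t ∈ pvVals es)
    (hcond : b.contains w = false ∨ t < b.getD w 0) :
    pvMu es src (b.insert w t) < pvMu es src b := by
  obtain ⟨l1, l2, hsplit⟩ := List.append_of_mem hw
  have hnd : (pvKU es src).Nodup := PySem.Set.nodup_ofList _
  rw [hsplit] at hnd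
  have hw1 : w ∉ l1 := by
    intro hmem
    exact (List.disjoint_of_nodup_append hnd) hmem List.mem_cons_self
  have hw2 : w ∉ l2 := by
    have := (List.nodup_append.mp hnd).2.1
    exact (List.nodup_cons.mp this).1
  unfold pvMu
  rw [hsplit]
  simp only [List.map_append, List.map_cons, List.sum_append, List.sum_cons]
  have h1 : l1.map (pvG es (b.insert w t)) = l1.map (pvG es b) :=
    List.map_congr_left (fun k hk => pvG_insert_ne es b w t k (fun h => hw1 (h ▸ hk)))
  have h2 : l2.map (pvG es (b.insert w t)) = l2.map (pvG es b) :=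
    List.map_congr_left (fun k hk => pvG_insert_ne es b w t k (fun h => hw2 (h ▸ hk)))
  have hmid : pvG es (b.insert w t) w < pvG es b w := by
    unfold pvG
    rw [PySem.Dict.contains_insert, PySem.Dict.getD_insert_self]
    simp only [BEq.rfl, Bool.true_or, if_true]
    cases hcb : b.contains w
    · rw [if_neg (by simp)]
      exact pvRank_lt_len es t ht
    · rw [if_pos rfl]
      have hc : t < b.getD w 0 := by
        rcases hcond with hc | hc
        · rw [hcb] at hc; cases hc
        · exact hc
      exact pvRank_lt es t _ ht hc
  rw [h1, h2]
  omega

-- ---- A: one relaxation ----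

theorem pvRelax_facts {es : List (Int × Int × Int)} {src : Int} {mt v : Int}
    (hmt : pvReach es src v mt) (hmt1 : -1 ≤ mt) (wt : Int × Int)
    (hE : (v, wt.1, wt.2) ∈ es ∨ (wt.1, v, wt.2) ∈ es) (st : PySem.Dict Int Int × Bool)
    (hinv : pvInvA es src st.1) :
    pvInvA es src (pvRelax mt st wt).1 ∧
    (∀ k, st.1.contains k = true → (pvRelax mt st wt).1.contains k = true) ∧
    pvMu es src (pvRelax mt st wt).1 ≤ pvMu es src st.1 ∧
    ((pvRelax mt st wt).2 = true → st.2 = true ∨ pvMu es src (pvRelax mt st wt).1 < pvMu es src st.1) := by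
  obtain ⟨hg, hnd, hku⟩ := hinv
  unfold pvRelax
  split_ifs with h1 h2
  · -- the relaxation fires: best[w] = t, changed = True
    have hlt : mt < wt.2 := h1
    have ht1 : -1 ≤ wt.2 := le_of_lt (lt_of_le_of_lt hmt1 hlt)
    have hreach : pvReach es src wt.1 wt.2 := pvReach.step hmt hE hlt
    have hwsrc : wt.1 ≠ src := by
      rintro rfl
      rcases h2 with hc | hc
      · rw [hg.1] at hc; cases hc
      · rw [hg.2.1] at hc; omega
    have hgood : pvGood es src (st.1.insert wt.1 wt.2) := by
      refine ⟨?_, ?_, ?_⟩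
      · rw [PySem.Dict.contains_insert, hg.1, Bool.or_true]
      · rw [PySem.Dict.getD_insert, if_neg (Ne.symm hwsrc)]
        exact hg.2.1
      · intro k hk
        by_cases hkw : k = wt.1
        · subst hkw
          rw [PySem.Dict.getD_insert_self]
          exact ⟨ht1, hreach⟩
        · have hkb : st.1.contains k = true := by
            rw [PySem.Dict.contains_insert] at hk
            simpa [hkw] using hk
          rw [PySem.Dict.getD_insert, if_neg hkw]
          exact hg.2.2 k hkb
    have hmu : pvMu es src (st.1.insert wt.1 wt.2) < pvMu es src st.1 :=
      pvMu_insert_lt (pvKU_mem src hE) (pvVals_mem hE) h2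
    refine ⟨⟨hgood, PySem.Dict.nodup_keys_insert _ _ _ hnd, ?_⟩, ?_, le_of_lt hmu, fun _ => Or.inr hmu⟩
    · intro k hk
      by_cases hkw : k = wt.1
      · subst hkw
        rw [PySem.Dict.getD_insert_self]
        exact ⟨pvKU_mem src hE, pvVals_mem hE⟩
      · have hkb : st.1.contains k = true := by
          rw [PySem.Dict.contains_insert] at hk
          simpa [hkw] using hk
        rw [PySem.Dict.getD_insert, if_neg hkw]
        exact hku k hkb
    · intro k hk
      rw [PySem.Dict.contains_insert, hk, Bool.or_true]
  · exact ⟨⟨hg, hnd, hku⟩, fun k hk => hk, le_refl _, fun h => Or.inl h⟩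
  · exact ⟨⟨hg, hnd, hku⟩, fun k hk => hk, le_refl _, fun h => Or.inl h⟩

-- ---- A: folding the relaxations of one v, then of one pass ----

theorem pvRelaxFold_facts {es : List (Int × Int × Int)} {src : Int} {mt v : Int}
    (hmt : pvReach es src v mt) (hmt1 : -1 ≤ mt) :
    ∀ (l : List (Int × Int)) (st : PySem.Dict Int Int × Bool),
      (∀ wt ∈ l, (v, wt.1, wt.2) ∈ es ∨ (wt.1, v, wt.2) ∈ es) → pvInvA es src st.1 →
      pvInvA es src (l.foldl (pvRelax mt) st).1 ∧
      (∀ k, st.1.contains k = true → (l.foldl (pvRelax mt) st).1.contains k = true) ∧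
      pvMu es src (l.foldl (pvRelax mt) st).1 ≤ pvMu es src st.1 ∧
      ((l.foldl (pvRelax mt) st).2 = true →
        st.2 = true ∨ pvMu es src (l.foldl (pvRelax mt) st).1 < pvMu es src st.1) := by
  intro l
  induction l with
  | nil => exact fun st _ hinv => ⟨hinv, fun k hk => hk, le_refl _, fun h => Or.inl h⟩
  | cons wt l ih =>
    intro st hE hinv
    have step := pvRelax_facts hmt hmt1 wt (hE wt List.mem_cons_self) st hinv
    have rest := ih (pvRelax mt st wt) (fun p hp => hE p (List.mem_cons_of_mem _ hp)) step.1
    have hfold : (wt :: l).foldl (pvRelax mt) st = l.foldl (pvRelax mt) (pvRelax mt st wt) := rfl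
    rw [hfold]
    refine ⟨rest.1, fun k hk => rest.2.1 k (step.2.1 k hk), le_trans rest.2.2.1 step.2.2.1, ?_⟩
    intro hch
    rcases rest.2.2.2 hch with hmid | hlt
    · rcases step.2.2.2 hmid with h | h
      · exact Or.inl h
      · exact Or.inr (lt_of_le_of_lt rest.2.2.1 h)
    · exact Or.inr (lt_of_lt_of_le hlt step.2.2.1)

theorem pvVisitFold_facts (es : List (Int × Int × Int)) (src : Int) :
    ∀ (l : List Int) (st : PySem.Dict Int Int × Bool),
      pvInvA es src st.1 → (∀ x ∈ l, st.1.contains x = true) →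
      pvInvA es src (l.foldl (pvVisit (pvAdj es)) st).1 ∧
      (∀ k, st.1.contains k = true → (l.foldl (pvVisit (pvAdj es)) st).1.contains k = true) ∧
      pvMu es src (l.foldl (pvVisit (pvAdj es)) st).1 ≤ pvMu es src st.1 ∧
      ((l.foldl (pvVisit (pvAdj es)) st).2 = true →
        st.2 = true ∨ pvMu es src (l.foldl (pvVisit (pvAdj es)) st).1 < pvMu es src st.1) := by
  intro l
  induction l with
  | nil => exact fun st hinv _ => ⟨hinv, fun k hk => hk, le_refl _, fun h => Or.inl h⟩
  | cons v l ih =>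
    intro st hinv hl
    have hv : st.1.contains v = true := hl v List.mem_cons_self
    have hvg := hinv.1.2.2 v hv
    have step := pvRelaxFold_facts hvg.2 hvg.1 ((pvAdj es).getD v []) st
      (fun wt hwt => (pvMem_adj es v wt.1 wt.2).mp (by simpa using hwt)) hinv
    have hvisit : pvVisit (pvAdj es) st v
        = ((pvAdj es).getD v []).foldl (pvRelax (st.1.getD v 0)) st := rfl
    have rest := ih (pvVisit (pvAdj es) st v)
      (by rw [hvisit]; exact step.1)
      (by
        intro x hx
        rw [hvisit]
        exact step.2.1 x (hl x (List.mem_cons_of_mem _ hx)))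
    have hfold : (v :: l).foldl (pvVisit (pvAdj es)) st
        = l.foldl (pvVisit (pvAdj es)) (pvVisit (pvAdj es) st v) := rfl
    rw [hfold]
    rw [hvisit] at rest
    refine ⟨rest.1, fun k hk => rest.2.1 k (step.2.1 k hk), le_trans rest.2.2.1 step.2.2.1, ?_⟩
    intro hch
    rcases rest.2.2.2 hch with hmid | hlt
    · rcases step.2.2.2 hmid with h | h
      · exact Or.inl h
      · exact Or.inr (lt_of_le_of_lt rest.2.2.1 h)
    · exact Or.inr (lt_of_lt_of_le hlt step.2.2.1)

theorem pvPass_facts {es : List (Int × Int × Int)} {src : Int} {b : PySem.Dict Int Int}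
    (hinv : pvInvA es src b) :
    pvInvA es src (pvPass (pvAdj es) b).1 ∧
    pvMu es src (pvPass (pvAdj es) b).1 ≤ pvMu es src b ∧
    ((pvPass (pvAdj es) b).2 = true → pvMu es src (pvPass (pvAdj es) b).1 < pvMu es src b) := by
  have h := pvVisitFold_facts es src b.keys (b, false) hinv
    (fun x hx => (PySem.Dict.contains_iff_mem_keys b x).mpr hx)
  have hp : pvPass (pvAdj es) b = b.keys.foldl (pvVisit (pvAdj es)) (b, false) := rfl
  rw [hp]
  refine ⟨h.1, h.2.2.1, ?_⟩
  intro hch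
  rcases h.2.2.2 hch with h' | h'
  · cases h'
  · exact h'

-- ---- A: a pass that reports no change leaves best unchanged and closed ----

theorem pvRelax_snd_mono (mt : Int) :
    ∀ (l : List (Int × Int)) (st : PySem.Dict Int Int × Bool), st.2 = true →
      (l.foldl (pvRelax mt) st).2 = true := by
  intro l
  induction l with
  | nil => exact fun st h => h
  | cons wt l ih =>
    intro st h
    apply ih
    unfold pvRelax
    split_ifs
    · rfl
    · exact h
    · exact h

theorem pvVisit_snd_mono (adj : PySem.Dict Int (List (Int × Int))) :
    ∀ (l : List Int) (st : PySem.Dict Int Int × Bool), st.2 = true →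
      (l.foldl (pvVisit adj) st).2 = true := by
  intro l
  induction l with
  | nil => exact fun st h => h
  | cons v l ih =>
    intro st h
    exact ih _ (pvRelax_snd_mono _ _ _ h)

theorem pvRelaxFold_false (mt : Int) :
    ∀ (l : List (Int × Int)) (b : PySem.Dict Int Int),
      (l.foldl (pvRelax mt) (b, false)).2 = false →
      l.foldl (pvRelax mt) (b, false) = (b, false) ∧
      ∀ wt ∈ l, mt < wt.2 → b.contains wt.1 = true ∧ b.getD wt.1 0 ≤ wt.2 := by
  intro l
  induction l with
  | nil => exact fun b _ => ⟨rfl, by simp⟩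
  | cons wt l ih =>
    intro b hfalse
    have hstep : pvRelax mt (b, false) wt = (b, false) := by
      by_cases h1 : (wt.2 > mt)
      · by_cases h2 : (b.contains wt.1 = false ∨ wt.2 < b.getD wt.1 0)
        · exfalso
          have : pvRelax mt (b, false) wt = (b.insert wt.1 wt.2, true) := by
            unfold pvRelax
            rw [if_pos h1, if_pos h2]
          have hf : ((wt :: l).foldl (pvRelax mt) (b, false)).2 = true := by
            have hfold : (wt :: l).foldl (pvRelax mt) (b, false)
                = l.foldl (pvRelax mt) (pvRelax mt (b, false) wt) := rfl
            rw [hfold, this]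
            exact pvRelax_snd_mono mt l _ rfl
          rw [hf] at hfalse
          cases hfalse
        · unfold pvRelax
          rw [if_pos h1, if_neg h2]
      · unfold pvRelax
        rw [if_neg h1]
    have hfold : (wt :: l).foldl (pvRelax mt) (b, false)
        = l.foldl (pvRelax mt) (pvRelax mt (b, false) wt) := rfl
    rw [hfold, hstep] at hfalse ⊢
    obtain ⟨heq, hrest⟩ := ih b hfalse
    refine ⟨heq, ?_⟩
    intro p hp hlt
    rcases List.mem_cons.mp hp with rfl | hp'
    · -- the head relaxation did not fire although mt < p.2: so p.1 is present with value ≤ p.2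
      by_cases hc : b.contains p.1 = true
      · refine ⟨hc, ?_⟩
        by_cases hv : p.2 < b.getD p.1 0
        · exfalso
          have : pvRelax mt (b, false) p = (b.insert p.1 p.2, true) := by
            unfold pvRelax
            rw [if_pos hlt, if_pos (Or.inr hv)]
          rw [this] at hstep
          have := congrArg Prod.snd hstep
          simp at this
        · omega
      · exfalso
        have hcf : b.contains p.1 = false := by
          cases h : b.contains p.1
          · rfl
          · exact absurd h hc
        have : pvRelax mt (b, false) p = (b.insert p.1 p.2, true) := by
          unfold pvRelax
          rw [if_pos hlt, if_pos (Or.inl hcf)]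
        rw [this] at hstep
        have := congrArg Prod.snd hstep
        simp at this
    · exact hrest p hp' hlt

theorem pvPass_false {es : List (Int × Int × Int)} {b : PySem.Dict Int Int}
    (hfalse : (pvPass (pvAdj es) b).2 = false) :
    (pvPass (pvAdj es) b).1 = b ∧ pvClosed es b := by
  have aux : ∀ (l : List Int),
      ((l.foldl (pvVisit (pvAdj es)) (b, false)).2 = false) →
      l.foldl (pvVisit (pvAdj es)) (b, false) = (b, false) ∧
      ∀ v ∈ l, ∀ wt ∈ (pvAdj es).getD v [], b.getD v 0 < wt.2 →
        b.contains wt.1 = true ∧ b.getD wt.1 0 ≤ wt.2 := by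
    intro l
    induction l with
    | nil => exact fun _ => ⟨rfl, by simp⟩
    | cons v l ih =>
      intro hf
      have hfold : (v :: l).foldl (pvVisit (pvAdj es)) (b, false)
          = l.foldl (pvVisit (pvAdj es)) (pvVisit (pvAdj es) (b, false) v) := rfl
      have hvfalse : (pvVisit (pvAdj es) (b, false) v).2 = false := by
        cases hsnd : (pvVisit (pvAdj es) (b, false) v).2
        · rfl
        · exfalso
          have : ((v :: l).foldl (pvVisit (pvAdj es)) (b, false)).2 = true := by
            rw [hfold]
            exact pvVisit_snd_mono _ l _ hsnd
          rw [this] at hf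
          cases hf
      have hvisit : pvVisit (pvAdj es) (b, false) v
          = ((pvAdj es).getD v []).foldl (pvRelax (b.getD v 0)) (b, false) := rfl
      rw [hvisit] at hvfalse
      obtain ⟨hveq, hvfacts⟩ := pvRelaxFold_false (b.getD v 0) ((pvAdj es).getD v []) b hvfalse
      have hvisit_eq : pvVisit (pvAdj es) (b, false) v = (b, false) := by rw [hvisit, hveq]
      rw [hfold, hvisit_eq] at hf ⊢
      obtain ⟨heq, hrest⟩ := ih hf
      refine ⟨heq, ?_⟩
      intro v' hv' wt hwt hlt
      rcases List.mem_cons.mp hv' with rfl | hv''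
      · exact hvfacts wt hwt hlt
      · exact hrest v' hv'' wt hwt hlt
  have hp : pvPass (pvAdj es) b = b.keys.foldl (pvVisit (pvAdj es)) (b, false) := rfl
  rw [hp] at hfalse ⊢
  obtain ⟨heq, hfacts⟩ := aux b.keys hfalse
  rw [heq]
  refine ⟨rfl, ?_⟩
  intro v w t hv hE hlt
  have hvk : v ∈ b.keys := (PySem.Dict.contains_iff_mem_keys b v).mp hv
  have hwt : ((w, t) : Int × Int) ∈ (pvAdj es).getD v [] := (pvMem_adj es v w t).mpr hE
  exact hfacts v hvk (w, t) hwt hlt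

-- ---- A: the while loop reaches its fixed point within the fuel ----

theorem pvLoopA_facts (es : List (Int × Int × Int)) (src : Int) :
    ∀ (f : Nat) (b : PySem.Dict Int Int), pvInvA es src b → pvMu es src b < f →
      pvInvA es src (pvLoopA (pvAdj es) f b) ∧ pvClosed es (pvLoopA (pvAdj es) f b) := by
  intro f
  induction f with
  | zero => intro b _ h; omega
  | succ f ih =>
    intro b hinv hmu
    have hstep : pvLoopA (pvAdj es) (f + 1) b
        = if (pvPass (pvAdj es) b).2 then pvLoopA (pvAdj es) f (pvPass (pvAdj es) b).1
          else (pvPass (pvAdj es) b).1 := rfl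
    have hp := pvPass_facts (src := src) hinv
    cases hch : (pvPass (pvAdj es) b).2
    · obtain ⟨heq, hclosed⟩ := pvPass_false hch
      rw [hstep, hch]
      simp only [Bool.false_eq_true, if_false]
      rw [heq]
      exact ⟨hinv, hclosed⟩
    · rw [hstep, hch]
      simp only [if_true]
      exact ih _ hp.1 (by have := hp.2.2 hch; omega)

-- ---- A: initial dict and fuel bound ----

theorem pvInit_invA (es : List (Int × Int × Int)) (src : Int) :
    pvInvA es src ((PySem.Dict.empty : PySem.Dict Int Int).insert src (-1)) := by
  refine ⟨pvInit_good es src, pvInit_nodup src, ?_⟩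
  intro k hk
  have := (pvInit_contains src k).1 hk
  subst this
  rw [PySem.Dict.getD_insert_self]
  constructor
  · unfold pvKU
    rw [PySem.Set.mem_ofList]
    exact List.mem_cons_self
  · exact List.mem_cons_self

theorem pvFlat_len (es : List (Int × Int × Int)) :
    (es.flatMap (fun e => [e.1, e.2.1])).length = 2 * es.length := by
  induction es with
  | nil => rfl
  | cons e es ih => simp only [List.flatMap_cons, List.length_append, List.length_cons, ih]; simp; omega

theorem pvMu_init_lt (es : List (Int × Int × Int)) (src : Int) :
    pvMu es src ((PySem.Dict.empty : PySem.Dict Int Int).insert src (-1)) < pvFuel es := by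
  have hb : ∀ x ∈ (pvKU es src).map (pvG es ((PySem.Dict.empty : PySem.Dict Int Int).insert src (-1))),
      x ≤ (pvVals es).length := by
    rintro x hx
    obtain ⟨k, _, rfl⟩ := List.mem_map.mp hx
    exact pvG_le_len es _ k
  have hsum := List.sum_le_card_nsmul _ _ hb
  rw [List.length_map] at hsum
  have hKU : (pvKU es src).length ≤ 2 * es.length + 1 := by
    have h1 := PySem.Set.length_ofList_le (src :: es.flatMap (fun e => [e.1, e.2.1]))
    rw [List.length_cons, pvFlat_len] at h1
    exact le_trans h1 (by omega)
  have hvals : (pvVals es).length = es.length + 1 := by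
    unfold pvVals
    rw [List.length_cons, List.length_map]
  unfold pvMu pvFuel
  have : ((pvKU es src).map (pvG es ((PySem.Dict.empty : PySem.Dict Int Int).insert src (-1)))).sum
      ≤ (2 * es.length + 1) * (es.length + 1) := by
    calc _ ≤ (pvKU es src).length • (pvVals es).length := hsum
    _ = (pvKU es src).length * (pvVals es).length := smul_eq_mul _ _
    _ ≤ (2 * es.length + 1) * (es.length + 1) := by
        rw [hvals]
        exact Nat.mul_le_mul_right _ hKU
  have hgrow : (2 * es.length + 1) * (es.length + 1) < (2 * es.length + 2) * (es.length + 2) := by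
    nlinarith [es.length.zero_le]
  omega

theorem pvA_final (es : List (Int × Int × Int)) (src : Int) :
    (pvLoopA (pvAdj es) (pvFuel es) ((PySem.Dict.empty : PySem.Dict Int Int).insert src (-1))).keys.Nodup ∧
    pvGood es src (pvLoopA (pvAdj es) (pvFuel es) ((PySem.Dict.empty : PySem.Dict Int Int).insert src (-1))) ∧
    pvClosed es (pvLoopA (pvAdj es) (pvFuel es) ((PySem.Dict.empty : PySem.Dict Int Int).insert src (-1))) := by
  have h := pvLoopA_facts es src (pvFuel es) _ (pvInit_invA es src) (pvMu_init_lt es src)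
  exact ⟨h.1.2.1, h.1.1, h.2⟩

-- ---- glue: for each src the two per-source destination lists coincide ----

theorem pvDsts_eq (es : List (Int × Int × Int)) (src : Int) :
    PySem.List.sorted
      ((pvLoopA (pvAdj es) (pvFuel es)
          ((PySem.Dict.empty : PySem.Dict Int Int).insert src (-1))).keys.filter
        (fun d => decide (d ≠ src))) (fun x => x) false
    = PySem.List.sorted
      (((PySem.List.sorted es (fun e => e.2.2) false).foldl pvSweep
          ((PySem.Dict.empty : PySem.Dict Int Int).insert src (-1))).keys.filter
        (fun d => decide (d ≠ src))) (fun x => x) false := by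
  obtain ⟨hAnd, hAg, hAc⟩ := pvA_final es src
  obtain ⟨hBnd, hBg, hBc⟩ := pvB_final es src
  apply PySem.List.sorted_eq_sorted_of_perm _ _ _ (fun a b h => h)
  rw [List.perm_ext_iff_of_nodup (hAnd.filter _) (hBnd.filter _)]
  intro a
  simp only [List.mem_filter]
  have hmemiff : a ∈ (pvLoopA (pvAdj es) (pvFuel es)
      ((PySem.Dict.empty : PySem.Dict Int Int).insert src (-1))).keys ↔
      a ∈ ((PySem.List.sorted es (fun e => e.2.2) false).foldl pvSweep
      ((PySem.Dict.empty : PySem.Dict Int Int).insert src (-1))).keys := by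
    rw [← PySem.Dict.contains_iff_mem_keys, ← PySem.Dict.contains_iff_mem_keys,
      pvContains_iff hAg hAc hBg hBc a]
  constructor
  · rintro ⟨hmem, hne⟩
    exact ⟨hmemiff.mp hmem, hne⟩
  · rintro ⟨hmem, hne⟩
    exact ⟨hmemiff.mpr hmem, hne⟩

-- ===== VERDICT (by name: the statement is the Claim_ definition above) =====
theorem check_reachability_strict_spec : Claim_equal_check_reachability_strict := by
  intro n ts _
  unfold Spec_check_reachability_strict check_reachability_strict check_reachability_strict_alt
  apply List.foldl_ext
  intro r src _
  show PySem.Set.update r _ = PySem.Set.update r _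
  rw [pvDsts_eq (pvItems ts) src]
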